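-- pv_equiv track=rewrite | github.com/fhdufhdu/CodingTest | 프로그래머스/2/131127. 할인 행사/할인 행사.py | solution
-- ===== SOURCE A (Python) =====
-- from collections import Counter
--
-- def solution(want, number, discount):
--     answer = 0
--     counter_list = []
--     for i in range(len(discount)-9):
--         counter_list.append(Counter(discount[i:i+10]))
--
--     for counter in counter_list:
--         check = True
--         for i in range(len(want)):
--             w = want[i]
--             n = number[i]
--
--             check = check and (counter[w] >= n)
--         if check:
--             answer += 1
--
--     return answer
-- ===== SOURCE B (Python) =====
-- from collections import Counter
--
-- def solution(want, number, discount):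
--     m = len(discount)
--     if m < 10:
--         return 0
--     cnt = Counter(discount[:10])
--     def ok():
--         return all(cnt[w] >= k for w, k in zip(want, number))
--     answer = 1 if ok() else 0
--     for s in range(1, m - 9):
--         cnt[discount[s - 1]] -= 1
--         cnt[discount[s + 9]] += 1
--         if ok():
--             answer += 1
--     return answer
-- ===== Notes on version B (the rewrite author's own statement) =====
-- stated objective: alternative
-- what changed: B replaces A's precomputed list of per-window Counters (each rebuilt from a 10-element slice) by a single Counter slid across discount (decrement the leaving element, increment the entering one) with an all()-over-zip requirement check, skipping short inputs up front.
import Mathlib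
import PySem

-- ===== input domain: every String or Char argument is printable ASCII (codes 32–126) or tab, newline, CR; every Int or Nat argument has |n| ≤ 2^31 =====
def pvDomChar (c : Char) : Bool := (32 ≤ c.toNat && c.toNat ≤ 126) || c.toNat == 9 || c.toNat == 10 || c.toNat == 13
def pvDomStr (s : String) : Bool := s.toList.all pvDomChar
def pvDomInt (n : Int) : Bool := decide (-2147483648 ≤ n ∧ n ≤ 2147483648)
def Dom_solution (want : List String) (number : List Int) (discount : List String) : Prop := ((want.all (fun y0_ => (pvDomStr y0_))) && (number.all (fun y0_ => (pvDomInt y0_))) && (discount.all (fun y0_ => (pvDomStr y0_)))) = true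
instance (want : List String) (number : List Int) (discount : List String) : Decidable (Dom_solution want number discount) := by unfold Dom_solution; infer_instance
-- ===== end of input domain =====

-- B slides one running Counter across discount instead of building a list of per-window Counters; equivalence of the return value is proved on Pre_.

-- ===== PORT A =====
def solution (want : List String) (number : List Int) (discount : List String) : Int :=
  let counterList := (PySem.List.pyRange 0 ((discount.length : Int) - 9) 1).map
    (fun i => PySem.Dict.counter (PySem.List.slice discount (some i) (some (i + 10))))
  counterList.foldl (fun answer counter =>
    let check := (PySem.List.pyRange 0 (want.length : Int) 1).foldl
      (fun check i =>
        let w := PySem.List.pyGetD want i ""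
        -- number[i] raises IndexError when want is longer than number: excluded by Pre_solution
        let n := PySem.List.pyGetD number i 0
        check && decide (n ≤ counter.getD w 0)) true
    if check then answer + 1 else answer) 0

-- ===== PORT B =====
-- B's helper ok(): all(cnt[w] >= k for w, k in zip(want, number))
def okAll (want : List String) (number : List Int) (cnt : PySem.Dict String Int) : Bool :=
  (want.zip number).all (fun p => decide (p.2 ≤ cnt.getD p.1 0))

-- B's loop body: cnt[discount[s-1]] -= 1; cnt[discount[s+9]] += 1; if ok(): answer += 1
def slideStep (want : List String) (number : List Int) (discount : List String)
    (st : Int × PySem.Dict String Int) (s : Int) : Int × PySem.Dict String Int :=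
  let c1 := st.2.modify (PySem.List.pyGetD discount (s - 1) "") 0 (· - 1)
  let c2 := c1.modify (PySem.List.pyGetD discount (s + 9) "") 0 (· + 1)
  (if okAll want number c2 then st.1 + 1 else st.1, c2)

def solution_alt (want : List String) (number : List Int) (discount : List String) : Int :=
  let m := discount.length
  if m < 10 then 0
  else
    let cnt0 := PySem.Dict.counter (PySem.List.slice discount none (some 10))
    let answer0 : Int := if okAll want number cnt0 then 1 else 0
    ((PySem.List.pyRange 1 ((m : Int) - 9) 1).foldl (slideStep want number discount)
      (answer0, cnt0)).1

-- ===== PRECONDITION & SPEC =====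
-- Pre_ excludes exactly the inputs where A raises IndexError: want longer than number
-- while there is at least one window (len(discount) ≥ 10).
def Pre_solution (want : List String) (number : List Int) (discount : List String) : Prop :=
  want.length ≤ number.length ∨ discount.length ≤ 9
instance (want : List String) (number : List Int) (discount : List String) : Decidable (Pre_solution want number discount) := by unfold Pre_solution; infer_instance

def pvWitness_solution : List String × List Int × List String :=
  (["a"], [2], ["a","a","b","a","a","a","b","a","a","a","a","b"])

def Spec_solution (want : List String) (number : List Int) (discount : List String) (out : Int) : Prop := out = solution_alt want number discount
instance (want : List String) (number : List Int) (discount : List String) (out : Int) : Decidable (Spec_solution want number discount out) := by unfold Spec_solution; infer_instance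

-- ===== CLAIM (what is proved, stated in full; the proofs are below) =====
def Claim_equal_solution : Prop := ∀ (want : List String) (number : List Int) (discount : List String), Dom_solution want number discount → Pre_solution want number discount → Spec_solution want number discount (solution want number discount)

-- ===== LEMMAS AND PROOFS =====

-- the 10-element window starting at j
def win (discount : List String) (j : Nat) : List String := (discount.drop j).take 10

-- A's boolean-and fold over indices is an `all` over List.range
lemma foldl_and_range (g : Int → Bool) (n : Nat) :
    (PySem.List.pyRange 0 (n : Int) 1).foldl (fun ch i => ch && g i) true
      = (List.range n).all (fun k => g (k : Int)) := by
  induction n with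
  | zero => simp [PySem.List.pyRange_one_eq_nil]
  | succ n ih =>
    have h : ((n : Int) + 1) = ((n + 1 : Nat) : Int) := by push_cast; ring
    rw [← h, PySem.List.pyRange_one_succ_right (by positivity)]
    rw [List.foldl_append, ih, List.range_succ, List.all_append]
    simp

-- the per-index check over both lists is the zip check
lemma all_range_zip (p : String → Int → Bool) :
    ∀ (want : List String) (number : List Int), want.length ≤ number.length →
    (List.range want.length).all (fun k => p (want.getD k "") (number.getD k 0))
      = (want.zip number).all (fun q => p q.1 q.2) := by
  intro want
  induction want with
  | nil => intro number _; simp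
  | cons w ws ih =>
    intro number hlen
    cases number with
    | nil => simp at hlen
    | cons n ns =>
      have hlen' : ws.length ≤ ns.length := by simpa using hlen
      simp only [List.length_cons, List.range_succ_eq_map, List.all_cons, List.all_map,
        List.zip_cons_cons, Function.comp_def, List.getD_cons_zero, List.getD_cons_succ]
      rw [ih ns hlen']

-- A's inner check loop equals B's ok() on any counter, given the length precondition
lemma checkA_eq_okAll (want : List String) (number : List Int)
    (h : want.length ≤ number.length) (c : PySem.Dict String Int) :
    (PySem.List.pyRange 0 (want.length : Int) 1).foldl
      (fun ch i => ch && decide (PySem.List.pyGetD number i 0 ≤ c.getD (PySem.List.pyGetD want i "") 0)) true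
      = okAll want number c := by
  rw [foldl_and_range (fun i => decide (PySem.List.pyGetD number i 0 ≤ c.getD (PySem.List.pyGetD want i "") 0)) want.length]
  simp only [PySem.List.pyGetD_natCast]
  exact all_range_zip (fun w n => decide (n ≤ c.getD w 0)) want number h

-- ok() only reads getD, so counters agreeing under getD give the same answer
lemma okAll_congr (want : List String) (number : List Int) (c1 c2 : PySem.Dict String Int)
    (h : ∀ w, c1.getD w 0 = c2.getD w 0) : okAll want number c1 = okAll want number c2 := by
  unfold okAll
  congr 1
  funext p
  rw [h]

-- window decompositions used by the sliding step
lemma win_cons (d : List String) (t : Nat) (h : t < d.length) :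
    win d t = d[t] :: (d.drop (t + 1)).take 9 := by
  unfold win
  rw [List.drop_eq_getElem_cons h, List.take_succ_cons]

lemma win_snoc (d : List String) (t : Nat) (h : t + 10 < d.length) :
    win d (t + 1) = (d.drop (t + 1)).take 9 ++ [d[t + 10]] := by
  unfold win
  conv_lhs => rw [show (10 : Nat) = 9 + 1 from rfl, List.take_add_one]
  congr 1
  have e : t + 1 + 9 = t + 10 := by omega
  rw [List.getElem?_drop]
  simp only [e, List.getElem?_eq_getElem h]
  rfl

-- sliding the window by one changes the count at the leaving/entering elements only
lemma count_slide (d : List String) (t : Nat) (ht10 : t + 10 < d.length) (v : String) :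
    ((win d (t + 1)).count v : Int)
      = ((win d t).count v : Int) + (if v = d[t + 10] then 1 else 0)
        - (if v = d[t] then 1 else 0) := by
  rw [win_cons d t (by omega), win_snoc d t ht10]
  by_cases h1 : v = d[t]
  · by_cases h2 : v = d[t + 10]
    · simp [List.count_append, ← h1, ← h2]
    · simp [List.count_append, ← h1, h2, Ne.symm h2]
  · by_cases h2 : v = d[t + 10]
    · simp [List.count_append, ← h2, h1, Ne.symm h1]
    · simp [List.count_append, h1, h2, Ne.symm h1, Ne.symm h2]

-- the sliding invariant: after t steps the answer is A-style and the counter counts window t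
lemma slideInv (want : List String) (number : List Int) (d : List String) :
    ∀ t : Nat, t + 10 ≤ d.length →
    (((PySem.List.pyRange 1 (1 + (t : Int)) 1).foldl (slideStep want number d)
        ((if okAll want number (PySem.Dict.counter (win d 0)) then (1 : Int) else 0),
          PySem.Dict.counter (win d 0))).1
      = (List.range (t + 1)).foldl
          (fun a k => if okAll want number (PySem.Dict.counter (win d k)) then a + 1 else a) 0)
    ∧ ∀ w, (((PySem.List.pyRange 1 (1 + (t : Int)) 1).foldl (slideStep want number d)
        ((if okAll want number (PySem.Dict.counter (win d 0)) then (1 : Int) else 0),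
          PySem.Dict.counter (win d 0))).2).getD w 0 = (win d t).count w := by
  intro t
  induction t with
  | zero =>
    intro _
    constructor
    · simp [PySem.List.pyRange_one_eq_nil, List.range_succ]
    · intro w
      simp [PySem.List.pyRange_one_eq_nil, PySem.Dict.getD_counter]
  | succ t ih =>
    intro hlen
    have ih' := ih (by omega)
    have hrange : PySem.List.pyRange 1 (1 + ((t + 1 : Nat) : Int)) 1
        = PySem.List.pyRange 1 (1 + (t : Int)) 1 ++ [1 + (t : Int)] := by
      have : (1 + ((t + 1 : Nat) : Int)) = (1 + (t : Int)) + 1 := by push_cast; ring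
      rw [this, PySem.List.pyRange_one_succ_right (by omega)]
    rw [hrange, List.foldl_append]
    set st := (PySem.List.pyRange 1 (1 + (t : Int)) 1).foldl (slideStep want number d)
        ((if okAll want number (PySem.Dict.counter (win d 0)) then (1 : Int) else 0),
          PySem.Dict.counter (win d 0)) with hst
    have ht : t < d.length := by omega
    have ht10 : t + 10 < d.length := by omega
    -- the two updated indices
    have hx1 : PySem.List.pyGetD d ((1 + (t : Int)) - 1) "" = d[t] := by
      have : (1 + (t : Int)) - 1 = ((t : Nat) : Int) := by omega
      rw [this, PySem.List.pyGetD_natCast, List.getD_eq_getElem d "" ht]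
    have hx2 : PySem.List.pyGetD d ((1 + (t : Int)) + 9) "" = d[t + 10] := by
      have : (1 + (t : Int)) + 9 = ((t + 10 : Nat) : Int) := by push_cast; ring
      rw [this, PySem.List.pyGetD_natCast, List.getD_eq_getElem d "" ht10]
    -- getD after the decrement
    have hc1 : ∀ v, (st.2.modify d[t] 0 (· - 1)).getD v 0
        = (if v = d[t] then (-1 : Int) else 0) + ((win d t).count v : Int) := by
      intro v
      rw [PySem.Dict.getD_modify]
      split_ifs with hv
      · rw [ih'.2 d[t], hv]; ring
      · rw [ih'.2 v]; ring
    have hcount : ∀ v, ((win d (t + 1)).count v : Int)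
        = ((win d t).count v : Int) + (if v = d[t + 10] then 1 else 0)
          - (if v = d[t] then 1 else 0) := fun v => count_slide d t ht10 v
    -- getD of the updated counter is the count in window t+1
    have hnew : ∀ w, ((st.2.modify (PySem.List.pyGetD d ((1 + (t : Int)) - 1) "") 0 (· - 1)).modify
        (PySem.List.pyGetD d ((1 + (t : Int)) + 9) "") 0 (· + 1)).getD w 0
        = (win d (t + 1)).count w := by
      intro w
      rw [hx1, hx2, PySem.Dict.getD_modify, hc1 d[t + 10], hc1 w, hcount w]
      by_cases h1 : w = d[t + 10]
      · subst h1
        split_ifs <;> omega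
      · simp only [if_neg h1]
        split_ifs <;> omega
    constructor
    · show (slideStep want number d st (1 + (t : Int))).1 = _
      unfold slideStep
      simp only
      rw [List.range_succ, List.foldl_append, ← ih'.1]
      have := okAll_congr want number _ (PySem.Dict.counter (win d (t + 1)))
        (fun w => by rw [hnew w, PySem.Dict.getD_counter])
      rw [this]
      simp
    · intro w
      show ((slideStep want number d st (1 + (t : Int))).2).getD w 0 = _
      unfold slideStep
      simp only
      exact hnew w

-- ===== VERDICT (by name: the statement is the Claim_ definition above) =====
theorem solution_spec : Claim_equal_solution := by
  intro want number discount _ hpre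
  unfold Spec_solution solution solution_alt
  by_cases hm : discount.length < 10
  · -- no window: both are 0
    have : ((discount.length : Int) - 9) ≤ 0 := by omega
    simp [PySem.List.pyRange_one_eq_nil (by omega : ((discount.length : Int) - 9) ≤ 0), hm]
  · have hlen : 10 ≤ discount.length := by omega
    have hwn : want.length ≤ number.length := by
      rcases hpre with h | h
      · exact h
      · omega
    simp only [if_neg hm]
    rw [List.foldl_map]
    rw [PySem.List.foldl_congr_mem _ _
      (fun (a : Int) (i : Int) =>
        if okAll want number (PySem.Dict.counter (PySem.List.slice discount (some i) (some (i + 10))))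
        then a + 1 else a) 0
      (fun a i _ => by rw [checkA_eq_okAll want number hwn])]
    rw [PySem.List.pyRange_one, List.foldl_map]
    have hsl : ∀ k : Nat, PySem.List.slice discount (some (0 + (k : Int))) (some (0 + (k : Int) + 10))
        = win discount k := by
      intro k
      have := PySem.List.slice_natCast_add discount (j := k) (n := 10)
      simpa [win] using this
    simp only [hsl]
    have hcnt0 : PySem.List.slice discount none (some 10) = win discount 0 := by
      have := PySem.List.slice_to_natCast discount 10
      simpa [win] using this
    rw [hcnt0]
    have hb : (discount.length : Int) - 9 = 1 + ((discount.length - 10 : Nat) : Int) := by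
      have : ((discount.length - 10 : Nat) : Int) = (discount.length : Int) - 10 := by omega
      omega
    rw [hb]
    have hmain := (slideInv want number discount (discount.length - 10) (by omega)).1
    rw [hmain]
    have hN : (1 + ((discount.length - 10 : Nat) : Int) - 0).toNat = (discount.length - 10) + 1 := by
      omega
    rw [hN]
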